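-- pv_equiv track=rewrite | github.com/vinr515/City-Growth | FileConvert.py | to_table
-- ===== SOURCE A (Python) =====
-- def to_table(text):
--     """Turns a list of list of values (from clean_file) into a list
-- The new list has [start, end, rowLength] that says where each table is"""
--     tableSeries, startNum, runNum = [], 0, 0
--     for i in range(len(text)):
--         rowLength = len(text[i])
--         if(rowLength != runNum):
--             if(runNum > 1 and (i-startNum) > 1):
--                 tableSeries.append([startNum, i, runNum])
--             startNum = i
--             runNum = rowLength
--
--     return tableSeries
-- ===== SOURCE B (Python) =====
-- def to_table(text):
--     """Turns a list of list of values (from clean_file) into a list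
-- The new list has [start, end, rowLength] that says where each table is"""
--     starts = [i for i in range(len(text))
--               if (len(text[i]) != 0 if i == 0 else len(text[i]) != len(text[i - 1]))]
--     return [[s, t, len(text[s])]
--             for s, t in zip(starts, starts[1:])
--             if len(text[s]) > 1 and t - s > 1]
-- ===== Notes on version B (the rewrite author's own statement) =====
-- stated objective: alternative
-- what changed: Replaces A's single stateful scan carrying (tableSeries, startNum, runNum) registers by a two-pass decomposition: first collect all run-start indices (index 0 when the first row is non-empty, plus every index whose row length differs from its predecessor), then emit [s, t, len(text[s])] for each consecutive pair of starts with width > 1 and span > 1.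
import Mathlib
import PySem

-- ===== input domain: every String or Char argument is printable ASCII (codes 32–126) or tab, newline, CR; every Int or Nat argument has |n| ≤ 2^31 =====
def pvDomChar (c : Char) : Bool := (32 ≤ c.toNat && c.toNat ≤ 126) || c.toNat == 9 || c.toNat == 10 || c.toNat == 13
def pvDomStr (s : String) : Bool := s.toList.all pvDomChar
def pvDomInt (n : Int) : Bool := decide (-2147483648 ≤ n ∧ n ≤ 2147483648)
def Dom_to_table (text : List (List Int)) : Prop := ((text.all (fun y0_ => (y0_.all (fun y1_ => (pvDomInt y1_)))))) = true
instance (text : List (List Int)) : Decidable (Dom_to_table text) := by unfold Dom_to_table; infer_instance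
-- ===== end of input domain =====

-- B replaces A's single stateful scan (start/run-length registers) by a two-pass decomposition:
-- collect the run-start indices, then emit a row for each consecutive pair of starts ("alternative").

-- ===== PORT A =====
-- A: one fold over the enumerated rows carrying (tableSeries, startNum, runNum).
def to_table (text : List (List Int)) : List (List Int) :=
  ((PySem.List.enumerate text 0).foldl
    (fun st p =>
      let rowLength : Int := p.2.length
      if rowLength ≠ st.2.2 then
        ((if st.2.2 > 1 ∧ p.1 - st.2.1 > 1 then st.1 ++ [[st.2.1, p.1, st.2.2]] else st.1),
         p.1, rowLength)
      else st)
    ([], 0, 0)).1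

-- ===== PORT B =====
-- row i starts a new run: i == 0 ? len(text[0]) != 0 : len(text[i]) != len(text[i-1])
def pvIsStart (text : List (List Int)) (p : Int × List Int) : Bool :=
  if p.1 = 0 then decide ((p.2.length : Int) ≠ 0)
  else decide ((PySem.List.pyGet? text (p.1 - 1)).map (fun r => (r.length : Int)) ≠ some (p.2.length : Int))

def pvStarts (text : List (List Int)) : List Int :=
  (PySem.List.enumerate text 0).filterMap (fun p => if pvIsStart text p then some p.1 else none)

-- len(text[s]) for an in-range index s
def pvLenAt (text : List (List Int)) (s : Int) : Int :=
  (((PySem.List.pyGet? text s).getD []).length : Int)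

def to_table_alt (text : List (List Int)) : List (List Int) :=
  let starts := pvStarts text
  (starts.zip starts.tail).filterMap (fun q =>
    if 1 < pvLenAt text q.1 ∧ 1 < q.2 - q.1 then some [q.1, q.2, pvLenAt text q.1] else none)

-- ===== PRECONDITION & SPEC =====
def Spec_to_table (text : List (List Int)) (out : List (List Int)) : Prop := out = to_table_alt text
instance (text : List (List Int)) (out : List (List Int)) : Decidable (Spec_to_table text out) := by unfold Spec_to_table; infer_instance

-- ===== CLAIM (what is proved, stated in full; the proofs are below) =====
def Claim_equal_to_table : Prop := ∀ (text : List (List Int)), Dom_to_table text → Spec_to_table text (to_table text)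

-- ===== LEMMAS AND PROOFS =====

-- A's fold step, named for the proofs
def pvStepA (st : List (List Int) × Int × Int) (p : Int × List Int) : List (List Int) × Int × Int :=
  let rowLength : Int := p.2.length
  if rowLength ≠ st.2.2 then
    ((if st.2.2 > 1 ∧ p.1 - st.2.1 > 1 then st.1 ++ [[st.2.1, p.1, st.2.2]] else st.1),
     p.1, rowLength)
  else st

-- B's emitter, named for the proofs
def pvEmit (text : List (List Int)) (ss : List Int) : List (List Int) :=
  (ss.zip ss.tail).filterMap (fun q =>
    if 1 < pvLenAt text q.1 ∧ 1 < q.2 - q.1 then some [q.1, q.2, pvLenAt text q.1] else none)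

-- starts among the first n rows
def pvStartsPre (text : List (List Int)) (n : Nat) : List Int :=
  (PySem.List.enumerate (text.take n) 0).filterMap (fun p => if pvIsStart text p then some p.1 else none)

-- run length register after n rows
def pvRun (text : List (List Int)) (n : Nat) : Int :=
  if n = 0 then 0 else pvLenAt text ((n : Int) - 1)

lemma pv_zip_tail_append (ss : List Int) (n : Int) :
    (ss ++ [n]).zip (ss ++ [n]).tail
      = ss.zip ss.tail ++ (match ss.getLast? with | none => [] | some s => [(s, n)]) := by
  induction ss with
  | nil => simp
  | cons a ss ih =>
    cases ss with
    | nil => simp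
    | cons b ss' =>
      simp only [List.cons_append, List.tail_cons, List.zip_cons_cons] at *
      rw [ih]
      simp

lemma pv_invariant (text : List (List Int)) :
    ∀ n, n ≤ text.length →
      ((PySem.List.enumerate (text.take n) 0).foldl pvStepA ([], 0, 0)
          = (pvEmit text (pvStartsPre text n),
             ((pvStartsPre text n).getLast?.getD 0),
             pvRun text n))
      ∧ (0 < n → pvLenAt text ((pvStartsPre text n).getLast?.getD 0) = pvRun text n)
      ∧ (pvStartsPre text n = [] → pvRun text n = 0) := by
  intro n
  induction n with
  | zero =>
      intro _
      refine ⟨?_, by omega, fun _ => rfl⟩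
      simp [pvStartsPre, pvEmit, pvRun, PySem.List.enumerate_nil]
  | succ n ih =>
      intro hn
      have hlt : n < text.length := hn
      have hn' : n ≤ text.length := Nat.le_of_lt hlt
      obtain ⟨h1, h2, h3⟩ := ih hn'
      have hx : text[n]? = some text[n] := List.getElem?_eq_getElem hlt
      have htake : text.take (n+1) = text.take n ++ [text[n]] := by
        rw [List.take_add_one, hx] ; rfl
      have hlen : (text.take n).length = n := by simp [hn']
      have henum : PySem.List.enumerate (text.take (n+1)) 0
          = PySem.List.enumerate (text.take n) 0 ++ [((n:Int), text[n])] := by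
        rw [htake, PySem.List.enumerate_append, hlen]
        simp [PySem.List.enumerate_cons, PySem.List.enumerate_nil]
      have hstarts : pvStartsPre text (n+1)
          = pvStartsPre text n ++ (if pvIsStart text ((n:Int), text[n]) then [(n:Int)] else []) := by
        unfold pvStartsPre
        rw [henum, List.filterMap_append]
        by_cases hb : pvIsStart text ((n:Int), text[n]) <;> simp [hb]
      have hlenAtn : pvLenAt text ((n:Int)) = (text[n].length : Int) := by
        simp [pvLenAt, PySem.List.pyGet?_natCast, hx]
      have hcast : ((n+1 : Nat) : Int) - 1 = (n : Int) := by push_cast ; ring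
      have hrun1 : pvRun text (n+1) = (text[n].length : Int) := by
        unfold pvRun
        simp only [Nat.succ_ne_zero, if_false]
        rw [hcast, hlenAtn]
      have hbd : pvIsStart text ((n:Int), text[n]) = true ↔ ((text[n].length : Int) ≠ pvRun text n) := by
        cases n with
        | zero =>
            simp only [Nat.cast_zero, pvIsStart]
            simp [pvRun]
        | succ m =>
            have hm : m < text.length := Nat.lt_of_succ_lt hlt
            have hxm : text[m]? = some text[m] := List.getElem?_eq_getElem hm
            have hc : ((m+1 : Nat) : Int) - 1 = (m : Int) := by push_cast ; ring
            have hz : ((m+1 : Nat) : Int) ≠ 0 := by push_cast ; omega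
            simp only [pvIsStart, pvRun, if_neg hz, Nat.add_eq_zero_iff, hc,
              PySem.List.pyGet?_natCast, hxm, Option.map_some, pvLenAt, Option.getD_some]
            simp [ne_comm]
      have hfold : (PySem.List.enumerate (text.take (n+1)) 0).foldl pvStepA ([], 0, 0)
          = pvStepA (pvEmit text (pvStartsPre text n),
              (pvStartsPre text n).getLast?.getD 0, pvRun text n) ((n:Int), text[n]) := by
        rw [henum, List.foldl_append, h1] ; rfl
      by_cases hb : ((text[n].length : Int) ≠ pvRun text n)
      · -- row n starts a new run
        have hbt : pvIsStart text ((n:Int), text[n]) = true := hbd.mpr hb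
        have hss : pvStartsPre text (n+1) = pvStartsPre text n ++ [(n:Int)] := by
          rw [hstarts, hbt] ; rfl
        have hemit : pvEmit text (pvStartsPre text (n+1))
            = pvEmit text (pvStartsPre text n)
              ++ (match (pvStartsPre text n).getLast? with
                  | none => []
                  | some s => if 1 < pvLenAt text s ∧ 1 < (n:Int) - s
                              then [[s, (n:Int), pvLenAt text s]] else []) := by
          rw [hss]
          unfold pvEmit
          rw [pv_zip_tail_append, List.filterMap_append]
          cases hL : (pvStartsPre text n).getLast? with
          | none => simp
          | some s =>
              by_cases hc2 : 1 < pvLenAt text s ∧ 1 < (n:Int) - s <;> simp [hc2]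
        have hstep : pvStepA (pvEmit text (pvStartsPre text n),
              (pvStartsPre text n).getLast?.getD 0, pvRun text n) ((n:Int), text[n])
            = ((if pvRun text n > 1 ∧ (n:Int) - (pvStartsPre text n).getLast?.getD 0 > 1
                then pvEmit text (pvStartsPre text n)
                  ++ [[(pvStartsPre text n).getLast?.getD 0, (n:Int), pvRun text n]]
                else pvEmit text (pvStartsPre text n)),
               (n:Int), (text[n].length : Int)) := by
          unfold pvStepA
          simp [hb]
        have hlastnew : (pvStartsPre text (n+1)).getLast?.getD 0 = (n:Int) := by
          rw [hss] ; simp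
        refine ⟨?_, ?_, ?_⟩
        · rw [hfold, hstep, hemit, hlastnew, hrun1]
          cases hL : (pvStartsPre text n).getLast? with
          | none =>
              have hnil : pvStartsPre text n = [] := List.getLast?_eq_none_iff.mp hL
              have hr0 : pvRun text n = 0 := h3 hnil
              simp [hr0]
          | some s =>
              have hpos : 0 < n := by
                rcases Nat.eq_zero_or_pos n with h0 | h ; swap ; exact h
                exfalso
                have : pvStartsPre text 0 = [] := by
                  simp [pvStartsPre, PySem.List.enumerate_nil]
                rw [h0, this] at hL ; simp at hL
              have hls : pvLenAt text s = pvRun text n := by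
                have := h2 hpos ; rwa [hL] at this
              simp only [Option.getD_some, hls]
              by_cases hc2 : 1 < pvRun text n ∧ 1 < (n:Int) - s
              · rw [if_pos hc2, if_pos (by exact ⟨hc2.1, hc2.2⟩)]
              · rw [if_neg hc2, if_neg (by exact fun h => hc2 ⟨h.1, h.2⟩)]
                simp
        · intro _
          rw [hlastnew, hrun1, hlenAtn]
        · intro hcontra
          rw [hss] at hcontra
          simp at hcontra
      · -- row n continues the current run
        have hbe : ((text[n].length : Int)) = pvRun text n := not_not.mp hb
        have hbt : pvIsStart text ((n:Int), text[n]) = false := by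
          cases hEq : pvIsStart text ((n:Int), text[n])
          · rfl
          · exact absurd (hbd.mp hEq) (by simp [hbe])
        have hss : pvStartsPre text (n+1) = pvStartsPre text n := by
          rw [hstarts, hbt] ; simp
        have hrun2 : pvRun text (n+1) = pvRun text n := by rw [hrun1, hbe]
        have hstep : pvStepA (pvEmit text (pvStartsPre text n),
              (pvStartsPre text n).getLast?.getD 0, pvRun text n) ((n:Int), text[n])
            = (pvEmit text (pvStartsPre text n),
               (pvStartsPre text n).getLast?.getD 0, pvRun text n) := by
          unfold pvStepA
          simp [hbe]
        refine ⟨?_, ?_, ?_⟩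
        · rw [hfold, hstep, hss, hrun2]
        · intro _
          rw [hss, hrun2]
          rcases Nat.eq_zero_or_pos n with h0 | hpos
          · subst h0
            have hnil : pvStartsPre text 0 = [] := by
              simp [pvStartsPre, PySem.List.enumerate_nil]
            rw [hnil]
            simp only [List.getLast?_nil, Option.getD_none]
            have h0' : pvLenAt text 0 = (text[0].length : Int) := by simpa using hlenAtn
            rw [h0', hbe]
          · exact h2 hpos
        · intro hnil
          rw [hrun2]
          exact h3 (hss ▸ hnil)

theorem pv_main (text : List (List Int)) : to_table text = to_table_alt text := by
  have h := (pv_invariant text text.length le_rfl).1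
  rw [List.take_length] at h
  have hA : to_table text = ((PySem.List.enumerate text 0).foldl pvStepA ([], 0, 0)).1 := rfl
  have hB : to_table_alt text = pvEmit text (pvStarts text) := rfl
  have hSP : pvStartsPre text text.length = pvStarts text := by
    unfold pvStartsPre pvStarts ; rw [List.take_length]
  rw [hA, h, hSP, hB]

-- ===== VERDICT (by name: the statement is the Claim_ definition above) =====
theorem to_table_spec : Claim_equal_to_table := by
  intro text _
  unfold Spec_to_table
  exact pv_main text
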